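-- pv_equiv track=rewrite | github.com/benfrisbie/python-puzzles | amazon-online-assement-training/island-detector/island-detector.py | island_counter
-- ===== SOURCE A (Python) =====
-- class Graph:
--     def __init__(self):
--         self.graph = dict()
--
--     def add_node(self, node):
--         if node not in self.graph:
--             self.graph[node] = set()
--
--     def add_edge(self, n0, n1):
--         self.add_node(n0)
--         self.add_node(n1)
--
--         self.graph[n0].add(n1)
--         self.graph[n1].add(n0)
--
--     def depth_first_traversal(self, node, visited):
--         visited[node] = True
--
--         for adjacent in self.graph[node]:
--             if visited[adjacent] == False:
--                 self.depth_first_traversal(adjacent, visited)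
--
--     def count_sections(self):
--         count = 0
--
--         visited = dict()
--         for node in self.graph:
--             visited[node] = False
--
--         for node in self.graph:
--             if visited[node] == False:
--                 self.depth_first_traversal(node, visited)
--                 count += 1
--             if all(visited.values()):
--                 break
--
--         return count
--
-- def island_counter(grid):
--     rows = len(grid)
--     cols = len(grid[0])
--
--     g = Graph()
--     for i in range(rows):
--         for j in range(cols):
--             if grid[i][j] == 1:
--                 g.add_node((i,j))
--                 # up
--                 if i > 0 and grid[i-1][j] == 1:
--                     g.add_edge((i,j), (i-1, j))
--                 # down
--                 if i < rows-1 and grid[i+1][j] == 1: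
--                     g.add_edge((i,j), (i+1, j))
--                 # left
--                 if j > 0 and grid[i][j-1] == 1:
--                     g.add_edge((i,j), (i, j-1))
--                 # right
--                 if j < cols-1 and grid[i][j+1] == 1:
--                     g.add_edge((i,j), (i, j+1))
--
--     return g.count_sections()
-- ===== SOURCE B (Python) =====
-- def island_counter(grid):
--     rows = len(grid)
--     cols = len(grid[0])
--     visited = set()
--     count = 0
--     for i in range(rows):
--         for j in range(cols):
--             if grid[i][j] == 1 and (i, j) not in visited:
--                 count += 1
--                 visited.add((i, j))
--                 stack = [(i, j)]
--                 while stack: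
--                     x, y = stack.pop()
--                     for nx, ny in ((x - 1, y), (x + 1, y), (x, y - 1), (x, y + 1)):
--                         if 0 <= nx < rows and 0 <= ny < cols and grid[nx][ny] == 1 and (nx, ny) not in visited:
--                             visited.add((nx, ny))
--                             stack.append((nx, ny))
--     return count
-- ===== Notes on version B (the rewrite author's own statement) =====
-- stated objective: alternative
-- what changed: B flood-fills the grid directly with an explicit stack and a visited set in one pass, instead of A's building an adjacency-dict graph object, marking components by recursive DFS, and rescanning all(visited.values()) after every outer node.
import Mathlib
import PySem

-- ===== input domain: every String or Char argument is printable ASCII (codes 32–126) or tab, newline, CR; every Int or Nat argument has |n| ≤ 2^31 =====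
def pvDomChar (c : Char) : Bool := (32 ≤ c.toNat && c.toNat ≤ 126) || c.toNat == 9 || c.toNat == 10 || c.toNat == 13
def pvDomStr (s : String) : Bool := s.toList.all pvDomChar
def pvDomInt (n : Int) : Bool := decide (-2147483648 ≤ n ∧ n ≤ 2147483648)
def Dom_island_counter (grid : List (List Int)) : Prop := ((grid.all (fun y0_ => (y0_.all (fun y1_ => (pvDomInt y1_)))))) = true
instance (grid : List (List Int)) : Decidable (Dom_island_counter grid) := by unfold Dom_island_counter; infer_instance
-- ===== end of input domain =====

-- B replaces A's graph-object construction + recursive DFS + per-node all(visited.values()) scan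
-- by a single pass over the grid with an explicit-stack flood fill and a visited set.

-- grid[i][j] (both Pythons only evaluate it with indices that are in range under Pre_)
def pvGet (grid : List (List Int)) (i j : Int) : Int :=
  PySem.List.pyGetD (PySem.List.pyGetD grid i []) j 0

-- ===== PORT A =====

-- Graph.add_node
def pvAddNode (g : PySem.Dict (Int × Int) (PySem.Set (Int × Int))) (n : Int × Int) :
    PySem.Dict (Int × Int) (PySem.Set (Int × Int)) :=
  if g.contains n then g else g.insert n PySem.Set.empty

-- Graph.add_edge (nodes are always present when the sets are modified, so the ∅ default is never used)
def pvAddEdge (g : PySem.Dict (Int × Int) (PySem.Set (Int × Int))) (n0 n1 : Int × Int) :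
    PySem.Dict (Int × Int) (PySem.Set (Int × Int)) :=
  let g1 := pvAddNode (pvAddNode g n0) n1
  let g2 := g1.modify n0 PySem.Set.empty (fun s => PySem.Set.add s n1)
  g2.modify n1 PySem.Set.empty (fun s => PySem.Set.add s n0)

-- the grid-scanning loop of island_counter that builds g
def pvBuildStep (grid : List (List Int)) (rows cols : Int)
    (g : PySem.Dict (Int × Int) (PySem.Set (Int × Int))) (p : Int × Int) :
    PySem.Dict (Int × Int) (PySem.Set (Int × Int)) :=
  let i := p.1; let j := p.2
  if pvGet grid i j == 1 then
    let g := pvAddNode g (i, j)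
    let g := if i > 0 && pvGet grid (i-1) j == 1 then pvAddEdge g (i, j) (i-1, j) else g
    let g := if i < rows - 1 && pvGet grid (i+1) j == 1 then pvAddEdge g (i, j) (i+1, j) else g
    let g := if j > 0 && pvGet grid i (j-1) == 1 then pvAddEdge g (i, j) (i, j-1) else g
    if j < cols - 1 && pvGet grid i (j+1) == 1 then pvAddEdge g (i, j) (i, j+1) else g
  else g

def pvBuild (grid : List (List Int)) : PySem.Dict (Int × Int) (PySem.Set (Int × Int)) :=
  let rows : Int := PySem.List.len grid
  let cols : Int := PySem.List.len (PySem.List.pyGetD grid 0 [])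
  (PySem.List.pyRange 0 rows 1).foldl (fun g i =>
    (PySem.List.pyRange 0 cols 1).foldl (fun g j => pvBuildStep grid rows cols g (i, j)) g)
    PySem.Dict.empty

-- Graph.depth_first_traversal; fuel only makes the recursion total in Lean
-- (any fuel > number of still-unvisited nodes suffices, proved below)
mutual
def pvDfs (g : PySem.Dict (Int × Int) (PySem.Set (Int × Int))) :
    Nat → (Int × Int) → PySem.Dict (Int × Int) Bool → Option (PySem.Dict (Int × Int) Bool)
  | 0, _, _ => none
  | fuel+1, node, vis => pvDfsList g fuel (g.getD node PySem.Set.empty) (vis.insert node true)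
termination_by fuel _ _ => (fuel, 0)
def pvDfsList (g : PySem.Dict (Int × Int) (PySem.Set (Int × Int))) :
    Nat → List (Int × Int) → PySem.Dict (Int × Int) Bool → Option (PySem.Dict (Int × Int) Bool)
  | _, [], vis => some vis
  | fuel, a :: rest, vis =>
    if vis.getD a false = false then
      match pvDfs g fuel a vis with
      | none => none
      | some vis' => pvDfsList g fuel rest vis'
    else pvDfsList g fuel rest vis
termination_by fuel l _ => (fuel, 1 + l.length)
end

-- all(visited.values())
def pvAllVisited (vis : PySem.Dict (Int × Int) Bool) : Bool := vis.values.all (fun b => b)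

-- Graph.count_sections' main loop (with the early break)
def pvCountLoop (g : PySem.Dict (Int × Int) (PySem.Set (Int × Int))) (fuel : Nat) :
    List (Int × Int) → PySem.Dict (Int × Int) Bool → Int → Option Int
  | [], _, c => some c
  | node :: rest, vis, c =>
    if vis.getD node false = false then
      match pvDfs g fuel node vis with
      | none => none
      | some vis' =>
        if pvAllVisited vis' then some (c + 1) else pvCountLoop g fuel rest vis' (c + 1)
    else
      if pvAllVisited vis then some c else pvCountLoop g fuel rest vis c

def island_counter (grid : List (List Int)) : Int :=
  let g := pvBuild grid
  let vis0 := g.keys.foldl (fun d n => d.insert n false) PySem.Dict.empty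
  match pvCountLoop g (g.keys.length + 1) g.keys vis0 0 with
  | some c => c
  | none => 0   -- unreachable: the fuel bound is proved sufficient below

-- ===== PORT B =====

-- the while-stack flood fill; fuel only makes the while-loop total in Lean (rows*cols+1 is proved sufficient)
def pvFlood (grid : List (List Int)) (rows cols : Int) :
    Nat → List (Int × Int) → PySem.Set (Int × Int) → Option (PySem.Set (Int × Int))
  | _, [], vis => some vis
  | 0, _ :: _, _ => none
  | fuel+1, s :: ss, vis =>
    match PySem.List.pop? (s :: ss) (-1) with
    | none => none   -- unreachable: the list is nonempty
    | some (xy, rest) =>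
      let st := [(xy.1 - 1, xy.2), (xy.1 + 1, xy.2), (xy.1, xy.2 - 1), (xy.1, xy.2 + 1)].foldl
        (fun (acc : PySem.Set (Int × Int) × List (Int × Int)) q =>
          if 0 ≤ q.1 && q.1 < rows && 0 ≤ q.2 && q.2 < cols && pvGet grid q.1 q.2 == 1
              && !(PySem.Set.contains acc.1 q) then
            (PySem.Set.add acc.1 q, acc.2 ++ [q])
          else acc)
        (vis, rest)
      pvFlood grid rows cols fuel st.2 st.1

-- the body of the double for-loop over (i, j)
def pvBStep (grid : List (List Int)) (rows cols : Int) (fuel : Nat)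
    (acc : Option (PySem.Set (Int × Int) × Int)) (i j : Int) :
    Option (PySem.Set (Int × Int) × Int) :=
  match acc with
  | none => none
  | some (vis, count) =>
    if pvGet grid i j == 1 && !(PySem.Set.contains vis (i, j)) then
      match pvFlood grid rows cols fuel [(i, j)] (PySem.Set.add vis (i, j)) with
      | none => none
      | some vis' => some (vis', count + 1)
    else some (vis, count)

def island_counter_alt (grid : List (List Int)) : Int :=
  let rows : Int := PySem.List.len grid
  let cols : Int := PySem.List.len (PySem.List.pyGetD grid 0 [])
  let fuel : Nat := grid.length * (PySem.List.pyGetD grid 0 []).length + 1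
  let r := (PySem.List.pyRange 0 rows 1).foldl (fun acc i =>
    (PySem.List.pyRange 0 cols 1).foldl (fun acc j => pvBStep grid rows cols fuel acc i j) acc)
    (some ((PySem.Set.empty : PySem.Set (Int × Int)), (0 : Int)))
  match r with
  | some (_, c) => c
  | none => 0   -- unreachable: the fuel bound is proved sufficient below

-- ===== PRECONDITION & SPEC =====

-- A raises IndexError on grid = [] (grid[0]) and on any row shorter than row 0
-- (grid[i][j] with j < len(grid[0])); exactly those inputs are excluded.
def Pre_island_counter (grid : List (List Int)) : Prop :=
  grid ≠ [] ∧ ∀ r ∈ grid, (grid.headD []).length ≤ r.length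

instance (grid : List (List Int)) : Decidable (Pre_island_counter grid) := by
  unfold Pre_island_counter; infer_instance

def pvWitness_island_counter : List (List Int) := [[1, 0, 1], [1, 1, 0], [0, 0, 1]]

def Spec_island_counter (grid : List (List Int)) (out : Int) : Prop := out = island_counter_alt grid
instance (grid : List (List Int)) (out : Int) : Decidable (Spec_island_counter grid out) := by
  unfold Spec_island_counter; infer_instance

-- ===== CLAIM (what is proved, stated in full; the proofs are below) =====
def Claim_equal_island_counter : Prop := ∀ (grid : List (List Int)), Dom_island_counter grid → Pre_island_counter grid → Spec_island_counter grid (island_counter grid)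

-- ===== LEMMAS AND PROOFS =====

-- ---- abstract grid notions (proof-side only) ----

def pvRowsI (grid : List (List Int)) : Int := (grid.length : Int)
def pvColsI (grid : List (List Int)) : Int := ((grid.headD []).length : Int)

def pvOneB (grid : List (List Int)) (p : Int × Int) : Bool :=
  decide (0 ≤ p.1) && decide (p.1 < pvRowsI grid) && decide (0 ≤ p.2) && decide (p.2 < pvColsI grid)
    && (pvGet grid p.1 p.2 == 1)

def pvAdjB (grid : List (List Int)) (p q : Int × Int) : Bool :=
  pvOneB grid p && pvOneB grid q && ((p.1 - q.1).natAbs + (p.2 - q.2).natAbs == 1)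

def pvReach (grid : List (List Int)) : (Int × Int) → (Int × Int) → Prop :=
  Relation.ReflTransGen (fun a b => pvAdjB grid a b = true)

def pvAll2 (grid : List (List Int)) : List (Int × Int) :=
  (PySem.List.pyRange 0 (pvRowsI grid) 1).flatMap
    (fun i => (PySem.List.pyRange 0 (pvColsI grid) 1).map (Prod.mk i))

noncomputable def pvComp (grid : List (List Int)) (v : Int × Int) : Finset (Int × Int) :=
  @Finset.filter _ (fun u => pvReach grid v u) (fun u => Classical.propDecidable _)
    ((pvAll2 grid).filter (fun p => pvOneB grid p)).toFinset

noncomputable def pvImg (grid : List (List Int)) (L : List (Int × Int)) : Finset (Finset (Int × Int)) :=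
  ((L.filter (fun p => pvOneB grid p)).toFinset).image (fun v => pvComp grid v)

-- basic facts
lemma pvAdjB_one {grid p q} (h : pvAdjB grid p q = true) : pvOneB grid p = true ∧ pvOneB grid q = true := by
  simp only [pvAdjB, Bool.and_eq_true] at h
  exact ⟨h.1.1, h.1.2⟩

lemma pvAdjB_symm {grid p q} (h : pvAdjB grid p q = true) : pvAdjB grid q p = true := by
  simp only [pvAdjB, Bool.and_eq_true, beq_iff_eq] at h ⊢
  obtain ⟨⟨h1, h2⟩, h3⟩ := h
  exact ⟨⟨h2, h1⟩, by omega⟩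

lemma pvReach_symm {grid p q} (h : pvReach grid p q) : pvReach grid q p :=
  Relation.ReflTransGen.symmetric (fun _ _ hab => pvAdjB_symm hab) h

lemma pvReach_one {grid p q} (h : pvReach grid p q) (hp : pvOneB grid p = true) : pvOneB grid q = true := by
  induction h with
  | refl => exact hp
  | tail _ hadj ih => exact (pvAdjB_one hadj).2

lemma mem_pvAll2 {grid p} : p ∈ pvAll2 grid ↔ 0 ≤ p.1 ∧ p.1 < pvRowsI grid ∧ 0 ≤ p.2 ∧ p.2 < pvColsI grid := by
  obtain ⟨i, j⟩ := p
  simp [pvAll2, List.mem_flatMap, PySem.List.mem_pyRange_one, and_assoc]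

lemma length_pvAll2 (grid : List (List Int)) : (pvAll2 grid).length = grid.length * (grid.headD []).length := by
  simp [pvAll2, List.length_flatMap, PySem.List.length_pyRange_one, pvRowsI, pvColsI]

lemma mem_pvAll2_of_one {grid p} (h : pvOneB grid p = true) : p ∈ pvAll2 grid := by
  simp only [pvOneB, Bool.and_eq_true, decide_eq_true_eq] at h
  exact mem_pvAll2.2 ⟨h.1.1.1.1, h.1.1.1.2, h.1.1.2, h.1.2⟩

lemma mem_pvComp {grid v u} : u ∈ pvComp grid v ↔ pvOneB grid u = true ∧ pvReach grid v u := by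
  simp [pvComp, Finset.mem_filter, List.mem_toFinset, List.mem_filter]
  intro _ h; exact mem_pvAll2_of_one h

lemma self_mem_pvComp {grid v} (h : pvOneB grid v = true) : v ∈ pvComp grid v :=
  mem_pvComp.2 ⟨h, Relation.ReflTransGen.refl⟩

lemma pvComp_eq_of_mem {grid v u} (h : u ∈ pvComp grid v) : pvComp grid u = pvComp grid v := by
  obtain ⟨hu, hr⟩ := mem_pvComp.1 h
  ext k
  simp only [mem_pvComp]
  exact ⟨fun ⟨hk, hrk⟩ => ⟨hk, hr.trans hrk⟩, fun ⟨hk, hrk⟩ => ⟨hk, (pvReach_symm hr).trans hrk⟩⟩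

lemma pvComp_closed {grid v k u} (hk : k ∈ pvComp grid v) (h : pvAdjB grid k u = true) :
    u ∈ pvComp grid v := by
  obtain ⟨hk1, hr⟩ := mem_pvComp.1 hk
  exact mem_pvComp.2 ⟨(pvAdjB_one h).2, hr.tail h⟩

lemma pv_card_step_new {T : Finset (Finset (Int × Int))} {s : Finset (Finset (Int × Int))} {c}
    (h : c ∉ T) : (((insert c s) \ T).card : Int) = ((s \ insert c T).card : Int) + 1 := by
  rw [Finset.insert_sdiff_of_notMem _ h, Finset.sdiff_insert]
  have h2 : insert c (s \ T) = insert c ((s \ T).erase c) := by ext x; simp; tauto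
  rw [h2, Finset.card_insert_of_notMem (Finset.notMem_erase c _)]
  push_cast; ring

lemma pv_foldl_nested {α β γ : Type} (xs : List α) (ys : List β) (f : γ → α × β → γ) (a : γ) :
    xs.foldl (fun acc x => ys.foldl (fun acc y => f acc (x, y)) acc) a
      = (xs.flatMap (fun x => ys.map (Prod.mk x))).foldl f a := by
  induction xs generalizing a with
  | nil => rfl
  | cons x xs ih => simp only [List.flatMap_cons, List.foldl_append, List.foldl_map, List.foldl_cons, ih]

lemma pvImg_cons_one {grid p L} (h : pvOneB grid p = true) :
    pvImg grid (p :: L) = insert (pvComp grid p) (pvImg grid L) := by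
  simp [pvImg, List.filter_cons, h, Finset.image_insert]

lemma pvImg_cons_zero {grid p L} (h : ¬ pvOneB grid p = true) :
    pvImg grid (p :: L) = pvImg grid L := by
  simp [pvImg, List.filter_cons, h]

-- ---- A side: graph construction ----

def pvInvB (grid : List (List Int)) (P : List (Int × Int))
    (g : PySem.Dict (Int × Int) (PySem.Set (Int × Int))) : Prop :=
  (∀ p, p ∈ g.keys ↔ ((p ∈ P ∧ pvOneB grid p = true) ∨ ∃ u ∈ P, pvAdjB grid u p = true)) ∧
  (∀ p u, u ∈ g.getD p PySem.Set.empty ↔ (pvAdjB grid p u = true ∧ (p ∈ P ∨ u ∈ P))) ∧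
  g.keys.Nodup

lemma pvAddNode_keys {g n p} : p ∈ (pvAddNode g n).keys ↔ p ∈ g.keys ∨ p = n := by
  unfold pvAddNode
  by_cases h : g.contains n
  · simp only [h, if_true]
    have := (PySem.Dict.contains_iff_mem_keys (d := g) (k := n)).1 h
    constructor
    · exact Or.inl
    · rintro (hp | rfl) <;> [exact hp; exact this]
  · simp only [h, Bool.false_eq_true, if_false, PySem.Dict.mem_keys_insert]
    tauto

lemma pvAddNode_getD {g n p} : (pvAddNode g n).getD p PySem.Set.empty = g.getD p PySem.Set.empty := by
  unfold pvAddNode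
  by_cases h : g.contains n
  · simp [h]
  · simp only [h, Bool.false_eq_true, if_false, PySem.Dict.getD_insert]
    by_cases hp : p = n
    · subst hp
      rw [if_pos rfl]
      exact (PySem.Dict.getD_of_not_contains g _ (by simpa using h)).symm
    · rw [if_neg hp]

lemma pvAddNode_nodup {g n} (h : (PySem.Dict.keys g).Nodup) : ((pvAddNode g n).keys).Nodup := by
  unfold pvAddNode
  by_cases hc : g.contains n
  · simpa [hc] using h
  · simpa [hc] using PySem.Dict.nodup_keys_insert g n PySem.Set.empty h

lemma pvAddEdge_keys {g a b p} : p ∈ (pvAddEdge g a b).keys ↔ p ∈ g.keys ∨ p = a ∨ p = b := by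
  unfold pvAddEdge
  simp only [PySem.Dict.keys_modify, PySem.Dict.mem_keys_insert, pvAddNode_keys]
  tauto

lemma pvAddEdge_mem_getD {g a b p u} (hab : a ≠ b) :
    u ∈ (pvAddEdge g a b).getD p PySem.Set.empty ↔
      u ∈ g.getD p PySem.Set.empty ∨ (p = a ∧ u = b) ∨ (p = b ∧ u = a) := by
  unfold pvAddEdge
  simp only [PySem.Dict.getD_modify, pvAddNode_getD]
  by_cases hpb : p = b
  · subst hpb
    rw [if_pos rfl, if_neg (Ne.symm hab)]
    simp only [PySem.Set.mem_add]
    tauto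
  · rw [if_neg hpb]
    by_cases hpa : p = a
    · subst hpa
      rw [if_pos rfl]
      simp only [PySem.Set.mem_add]
      tauto
    · rw [if_neg hpa]
      tauto

lemma pvAddEdge_nodup {g a b} (h : (PySem.Dict.keys g).Nodup) : ((pvAddEdge g a b).keys).Nodup := by
  unfold pvAddEdge
  simp only [PySem.Dict.keys_modify]
  exact PySem.Dict.nodup_keys_insert _ _ _
    (PySem.Dict.nodup_keys_insert _ _ _ (pvAddNode_nodup (pvAddNode_nodup h)))

lemma pvCondEdge_keys {grid g p n} {c : Bool} (hc : c = true ↔ pvAdjB grid p n = true) (p' : Int × Int) :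
    (p' ∈ (if c then pvAddEdge g p n else g).keys) ↔
      (p' ∈ g.keys ∨ (pvAdjB grid p n = true ∧ (p' = p ∨ p' = n))) := by
  by_cases h : c = true
  · simp only [h, if_true, pvAddEdge_keys]
    have := hc.1 h
    tauto
  · simp only [h, if_false]
    have : ¬ pvAdjB grid p n = true := fun ha => h (hc.2 ha)
    tauto

lemma pvCondEdge_getD {grid g p n} {c : Bool} (hc : c = true ↔ pvAdjB grid p n = true)
    (hn : p ≠ n) (p' u : Int × Int) :
    (u ∈ (if c then pvAddEdge g p n else g).getD p' PySem.Set.empty) ↔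
      (u ∈ g.getD p' PySem.Set.empty ∨
        (pvAdjB grid p n = true ∧ ((p' = p ∧ u = n) ∨ (p' = n ∧ u = p)))) := by
  by_cases h : c = true
  · simp only [h, if_true, pvAddEdge_mem_getD hn]
    have := hc.1 h
    tauto
  · simp only [h, if_false]
    have : ¬ pvAdjB grid p n = true := fun ha => h (hc.2 ha)
    tauto

lemma pvCondEdge_nodup {g : PySem.Dict (Int × Int) (PySem.Set (Int × Int))} {p n : Int × Int} {c : Bool} (h : (PySem.Dict.keys g).Nodup) :
    ((if c then pvAddEdge g p n else g).keys).Nodup := by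
  by_cases hcc : c = true <;> simp only [hcc, if_true, if_false]
  · exact pvAddEdge_nodup h
  · exact h

-- the four neighbour guards are exactly adjacency from (i, j)
lemma pvGuard_up {grid i j} (hone : pvOneB grid (i, j) = true) :
    ((decide (i > 0) && (pvGet grid (i-1) j == 1)) = true) ↔ pvAdjB grid (i, j) (i-1, j) = true := by
  simp only [pvAdjB, pvOneB, Bool.and_eq_true, decide_eq_true_eq, beq_iff_eq] at hone ⊢
  omega

lemma pvGuard_down {grid i j} (hone : pvOneB grid (i, j) = true) :
    ((decide (i < pvRowsI grid - 1) && (pvGet grid (i+1) j == 1)) = true) ↔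
      pvAdjB grid (i, j) (i+1, j) = true := by
  simp only [pvAdjB, pvOneB, Bool.and_eq_true, decide_eq_true_eq, beq_iff_eq] at hone ⊢
  omega

lemma pvGuard_left {grid i j} (hone : pvOneB grid (i, j) = true) :
    ((decide (j > 0) && (pvGet grid i (j-1) == 1)) = true) ↔ pvAdjB grid (i, j) (i, j-1) = true := by
  simp only [pvAdjB, pvOneB, Bool.and_eq_true, decide_eq_true_eq, beq_iff_eq] at hone ⊢
  omega

lemma pvGuard_right {grid i j} (hone : pvOneB grid (i, j) = true) :
    ((decide (j < pvColsI grid - 1) && (pvGet grid i (j+1) == 1)) = true) ↔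
      pvAdjB grid (i, j) (i, j+1) = true := by
  simp only [pvAdjB, pvOneB, Bool.and_eq_true, decide_eq_true_eq, beq_iff_eq] at hone ⊢
  omega

lemma pvAdj_classify {grid i j u} (h : pvAdjB grid (i, j) u = true) :
    u = (i-1, j) ∨ u = (i+1, j) ∨ u = (i, j-1) ∨ u = (i, j+1) := by
  obtain ⟨a, b⟩ := u
  simp only [pvAdjB, Bool.and_eq_true, beq_iff_eq] at h
  have := h.2
  simp only [Prod.mk.injEq]
  omega

lemma pvBuildStep_inv {grid P g p} (hp : p ∈ pvAll2 grid) (h : pvInvB grid P g) :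
    pvInvB grid (P ++ [p]) (pvBuildStep grid (pvRowsI grid) (pvColsI grid) g p) := by
  obtain ⟨i, j⟩ := p
  obtain ⟨hkeys, hget, hnd⟩ := h
  have hb := mem_pvAll2.1 hp
  by_cases h1 : (pvGet grid i j == 1) = true
  · -- a 1-cell: node added, up to four edges added
    have hone : pvOneB grid (i, j) = true := by
      simp only [pvOneB, Bool.and_eq_true, decide_eq_true_eq, beq_iff_eq] at h1 ⊢
      exact ⟨⟨⟨⟨hb.1, hb.2.1⟩, hb.2.2.1⟩, hb.2.2.2⟩, h1⟩
    have hstep : pvBuildStep grid (pvRowsI grid) (pvColsI grid) g (i, j) =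
        (let g0 := pvAddNode g (i, j)
         let g1 := if (decide (i > 0) && (pvGet grid (i-1) j == 1)) then pvAddEdge g0 (i, j) (i-1, j) else g0
         let g2 := if (decide (i < pvRowsI grid - 1) && (pvGet grid (i+1) j == 1)) then pvAddEdge g1 (i, j) (i+1, j) else g1
         let g3 := if (decide (j > 0) && (pvGet grid i (j-1) == 1)) then pvAddEdge g2 (i, j) (i, j-1) else g2
         if (decide (j < pvColsI grid - 1) && (pvGet grid i (j+1) == 1)) then pvAddEdge g3 (i, j) (i, j+1) else g3) := by
      simp only [pvBuildStep, h1, if_true]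
    rw [hstep]
    dsimp only
    have hn1 : (i, j) ≠ (i-1, j) := by intro hq; rw [Prod.ext_iff] at hq; omega
    have hn2 : (i, j) ≠ (i+1, j) := by intro hq; rw [Prod.ext_iff] at hq; omega
    have hn3 : (i, j) ≠ (i, j-1) := by intro hq; rw [Prod.ext_iff] at hq; omega
    have hn4 : (i, j) ≠ (i, j+1) := by intro hq; rw [Prod.ext_iff] at hq; omega
    refine ⟨?_, ?_, ?_⟩
    · -- keys
      intro p'
      rw [pvCondEdge_keys (pvGuard_right hone), pvCondEdge_keys (pvGuard_left hone),
        pvCondEdge_keys (pvGuard_down hone), pvCondEdge_keys (pvGuard_up hone), pvAddNode_keys,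
        hkeys p']
      constructor
      · rintro (((((hold | rfl) | ⟨ha, (rfl | rfl)⟩) | ⟨ha, (rfl | rfl)⟩) | ⟨ha, (rfl | rfl)⟩) | ⟨ha, (rfl | rfl)⟩)
        · rcases hold with ⟨hP, hO⟩ | ⟨u, hu, hadj⟩
          · exact Or.inl ⟨by simp [hP], hO⟩
          · exact Or.inr ⟨u, by simp [hu], hadj⟩
        all_goals first
          | exact Or.inl ⟨by simp, hone⟩
          | exact Or.inr ⟨(i, j), by simp, ha⟩
      · rintro (⟨hP, hO⟩ | ⟨u, hu, hadj⟩)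
        · rcases List.mem_append.1 hP with hP | hP
          · exact Or.inl (Or.inl (Or.inl (Or.inl (Or.inl (Or.inl ⟨hP, hO⟩)))))
          · simp only [List.mem_singleton] at hP
            exact Or.inl (Or.inl (Or.inl (Or.inl (Or.inr hP))))
        · rcases List.mem_append.1 hu with hu | hu
          · exact Or.inl (Or.inl (Or.inl (Or.inl (Or.inl (Or.inr ⟨u, hu, hadj⟩)))))
          · simp only [List.mem_singleton] at hu
            subst hu
            rcases pvAdj_classify hadj with rfl | rfl | rfl | rfl
            · exact Or.inl (Or.inl (Or.inl (Or.inr ⟨hadj, Or.inr rfl⟩)))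
            · exact Or.inl (Or.inl (Or.inr ⟨hadj, Or.inr rfl⟩))
            · exact Or.inl (Or.inr ⟨hadj, Or.inr rfl⟩)
            · exact Or.inr ⟨hadj, Or.inr rfl⟩
    · -- adjacency sets
      intro p' u
      rw [pvCondEdge_getD (pvGuard_right hone) hn4, pvCondEdge_getD (pvGuard_left hone) hn3,
        pvCondEdge_getD (pvGuard_down hone) hn2, pvCondEdge_getD (pvGuard_up hone) hn1]
      rw [show (pvAddNode g (i, j)).getD p' PySem.Set.empty = g.getD p' PySem.Set.empty from pvAddNode_getD,
        hget p' u]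
      constructor
      · rintro ((((⟨hadj, hPu⟩ | ⟨ha, (⟨rfl, rfl⟩ | ⟨rfl, rfl⟩)⟩) | ⟨ha, (⟨rfl, rfl⟩ | ⟨rfl, rfl⟩)⟩) |
            ⟨ha, (⟨rfl, rfl⟩ | ⟨rfl, rfl⟩)⟩) | ⟨ha, (⟨rfl, rfl⟩ | ⟨rfl, rfl⟩)⟩)
        · exact ⟨hadj, by rcases hPu with h' | h' <;> simp [h']⟩
        all_goals first
          | exact ⟨ha, Or.inl (by simp)⟩
          | exact ⟨pvAdjB_symm ha, Or.inr (by simp)⟩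
      · rintro ⟨hadj, hPu⟩
        rcases hPu with hPu | hPu <;> rcases List.mem_append.1 hPu with hmem | hmem
        · exact Or.inl (Or.inl (Or.inl (Or.inl ⟨hadj, Or.inl hmem⟩)))
        · -- p' = (i, j): u is one of the four neighbours
          simp only [List.mem_singleton] at hmem
          subst hmem
          rcases pvAdj_classify hadj with rfl | rfl | rfl | rfl
          · exact Or.inl (Or.inl (Or.inl (Or.inr ⟨hadj, Or.inl ⟨rfl, rfl⟩⟩)))
          · exact Or.inl (Or.inl (Or.inr ⟨hadj, Or.inl ⟨rfl, rfl⟩⟩))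
          · exact Or.inl (Or.inr ⟨hadj, Or.inl ⟨rfl, rfl⟩⟩)
          · exact Or.inr ⟨hadj, Or.inl ⟨rfl, rfl⟩⟩
        · exact Or.inl (Or.inl (Or.inl (Or.inl ⟨hadj, Or.inr hmem⟩)))
        · -- u = (i, j): p' is one of the four neighbours of (i, j)
          simp only [List.mem_singleton] at hmem
          subst hmem
          have hadj' := pvAdjB_symm hadj
          rcases pvAdj_classify hadj' with rfl | rfl | rfl | rfl
          · exact Or.inl (Or.inl (Or.inl (Or.inr ⟨hadj', Or.inr ⟨rfl, rfl⟩⟩)))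
          · exact Or.inl (Or.inl (Or.inr ⟨hadj', Or.inr ⟨rfl, rfl⟩⟩))
          · exact Or.inl (Or.inr ⟨hadj', Or.inr ⟨rfl, rfl⟩⟩)
          · exact Or.inr ⟨hadj', Or.inr ⟨rfl, rfl⟩⟩
    · -- keys stay nodup
      exact pvCondEdge_nodup (pvCondEdge_nodup (pvCondEdge_nodup (pvCondEdge_nodup
        (pvAddNode_nodup hnd))))
  · -- not a 1-cell: nothing changes
    have hnone : ¬ pvOneB grid (i, j) = true := by
      simp only [pvOneB, Bool.and_eq_true]
      rintro ⟨-, h'⟩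
      exact h1 h'
    have hstep : pvBuildStep grid (pvRowsI grid) (pvColsI grid) g (i, j) = g := by
      simp only [pvBuildStep, h1]
      rfl
    rw [hstep]
    refine ⟨?_, ?_, hnd⟩
    · intro p'
      rw [hkeys p']
      constructor
      · rintro (⟨hP, hO⟩ | ⟨u, hu, hadj⟩)
        · exact Or.inl ⟨by simp [hP], hO⟩
        · exact Or.inr ⟨u, by simp [hu], hadj⟩
      · rintro (⟨hP, hO⟩ | ⟨u, hu, hadj⟩)
        · rcases List.mem_append.1 hP with hP | hP
          · exact Or.inl ⟨hP, hO⟩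
          · simp only [List.mem_singleton] at hP
            subst hP
            exact absurd hO hnone
        · rcases List.mem_append.1 hu with hu | hu
          · exact Or.inr ⟨u, hu, hadj⟩
          · simp only [List.mem_singleton] at hu
            subst hu
            exact absurd (pvAdjB_one hadj).1 hnone
    · intro p' u
      rw [hget p' u]
      constructor
      · rintro ⟨hadj, hPu⟩
        exact ⟨hadj, by rcases hPu with h' | h' <;> simp [h']⟩
      · rintro ⟨hadj, hPu⟩
        refine ⟨hadj, ?_⟩
        rcases hPu with hPu | hPu <;> rcases List.mem_append.1 hPu with hmem | hmem
        · exact Or.inl hmem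
        · simp only [List.mem_singleton] at hmem
          subst hmem
          exact absurd (pvAdjB_one hadj).1 hnone
        · exact Or.inr hmem
        · simp only [List.mem_singleton] at hmem
          subst hmem
          exact absurd (pvAdjB_one hadj).2 hnone

lemma pvBuild_inv (grid : List (List Int)) :
    ∀ rest g P, (∀ p ∈ rest, p ∈ pvAll2 grid) → pvInvB grid P g →
    pvInvB grid (P ++ rest)
      (rest.foldl (fun g p => pvBuildStep grid (pvRowsI grid) (pvColsI grid) g p) g) := by
  intro rest
  induction rest with
  | nil => intro g P _ h; simpa using h
  | cons r rest ih =>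
    intro g P hmem h
    have h1 := pvBuildStep_inv (hmem r (by simp)) h
    have h2 := ih _ (P ++ [r]) (fun p hp => hmem p (by simp [hp])) h1
    simpa [List.append_assoc] using h2

lemma pvGetD_zero_headD (grid : List (List Int)) :
    PySem.List.pyGetD grid 0 ([] : List Int) = grid.headD [] := by
  cases grid <;> simp [PySem.List.pyGetD_zero]

lemma pvBuild_eq_foldl (grid : List (List Int)) :
    pvBuild grid = (pvAll2 grid).foldl
      (fun g p => pvBuildStep grid (pvRowsI grid) (pvColsI grid) g p) PySem.Dict.empty := by
  unfold pvBuild pvAll2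
  rw [pv_foldl_nested]
  simp [PySem.List.len_eq, pvGetD_zero_headD, pvRowsI, pvColsI]

lemma pvBuild_char (grid : List (List Int)) :
    (∀ p, p ∈ (pvBuild grid).keys ↔ pvOneB grid p = true) ∧
    (∀ p u, u ∈ (pvBuild grid).getD p PySem.Set.empty ↔ pvAdjB grid p u = true) ∧
    (pvBuild grid).keys.Nodup := by
  have h0 : pvInvB grid [] PySem.Dict.empty := by
    refine ⟨?_, ?_, ?_⟩
    · intro p; simp [PySem.Dict.keys_empty]
    · intro p u; simp [PySem.Dict.getD_empty, PySem.Set.empty]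
    · simp [PySem.Dict.keys_empty]
  have h := pvBuild_inv grid (pvAll2 grid) PySem.Dict.empty [] (fun p hp => hp) h0
  rw [← pvBuild_eq_foldl] at h
  simp only [List.nil_append] at h
  obtain ⟨hkeys, hget, hnd⟩ := h
  refine ⟨?_, ?_, hnd⟩
  · intro p
    rw [hkeys p]
    constructor
    · rintro (⟨-, hO⟩ | ⟨u, -, hadj⟩)
      · exact hO
      · exact (pvAdjB_one hadj).2
    · intro hO
      exact Or.inl ⟨mem_pvAll2_of_one hO, hO⟩
  · intro p u
    rw [hget p u]
    constructor
    · rintro ⟨hadj, -⟩; exact hadj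
    · intro hadj
      exact ⟨hadj, Or.inl (mem_pvAll2_of_one (pvAdjB_one hadj).1)⟩

-- ---- A side: unvisited count and DFS ----

def pvUc (K : List (Int × Int)) (vis : PySem.Dict (Int × Int) Bool) : Nat :=
  (K.filter (fun k => vis.getD k false = false)).length

lemma pvUc_pos {K vis k} (hk : k ∈ K) (hv : vis.getD k false = false) : 0 < pvUc K vis := by
  exact List.length_pos_of_mem (List.mem_filter.2 ⟨hk, by simp [hv]⟩)

lemma pvUc_insert {K vis k} (hnd : K.Nodup) (hk : k ∈ K) (hv : vis.getD k false = false) :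
    pvUc K (vis.insert k true) < pvUc K vis := by
  induction K with
  | nil => cases hk
  | cons a K ih =>
    rw [List.nodup_cons] at hnd
    unfold pvUc
    rcases List.mem_cons.1 hk with rfl | hk'
    · -- k is the head: it leaves the filter, the tail is unchanged
      rw [List.filter_cons, List.filter_cons]
      have hnew : (vis.insert k true).getD k false = true := PySem.Dict.getD_insert_self vis k true false
      have hcong : K.filter (fun x => decide ((vis.insert k true).getD x false = false))
          = K.filter (fun x => decide (vis.getD x false = false)) := by
        apply List.filter_congr
        intro x hx
        rw [PySem.Dict.getD_insert_of_ne vis true false (fun he => hnd.1 (by rw [← he]; exact hx))]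
      rw [hcong, hnew, hv]
      simp
    · -- k is in the tail
      have hne : a ≠ k := fun he => hnd.1 (he ▸ hk')
      rw [List.filter_cons, List.filter_cons,
        PySem.Dict.getD_insert_of_ne vis true false hne]
      have := ih hnd.2 hk'
      unfold pvUc at this
      by_cases ha : vis.getD a false = false
      · rw [if_pos (by simp [ha]), if_pos (by simp [ha])]
        simpa using this
      · rw [if_neg (by simp [ha]), if_neg (by simp [ha])]
        exact this

lemma pvUc_mono {K} {vis w : PySem.Dict (Int × Int) Bool}
    (h : ∀ k, vis.getD k false = true → w.getD k false = true) : pvUc K w ≤ pvUc K vis := by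
  unfold pvUc
  rw [← List.countP_eq_length_filter, ← List.countP_eq_length_filter]
  apply List.countP_mono_left
  intro x _ hx
  simp only [decide_eq_true_eq] at hx ⊢
  cases hw : vis.getD x false with
  | false => rfl
  | true => rw [h x hw] at hx; cases hx

-- what one call of depth_first_traversal does
def pvDfsOk (grid : List (List Int)) (node : Int × Int)
    (vis w : PySem.Dict (Int × Int) Bool) : Prop :=
  w.keys = vis.keys ∧
  (∀ k, vis.getD k false = true → w.getD k false = true) ∧
  w.getD node false = true ∧
  (∀ k, w.getD k false = true → vis.getD k false = true ∨ pvReach grid node k) ∧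
  (∀ k, w.getD k false = true →
    vis.getD k false = true ∨ ∀ u, pvAdjB grid k u = true → w.getD u false = true)

def pvPprop (grid : List (List Int)) (g : PySem.Dict (Int × Int) (PySem.Set (Int × Int)))
    (fuel : Nat) : Prop :=
  ∀ node vis, node ∈ g.keys → vis.keys = g.keys → vis.getD node false = false →
    pvUc g.keys vis ≤ fuel →
    ∃ w, pvDfs g fuel node vis = some w ∧ pvDfsOk grid node vis w

def pvQprop (grid : List (List Int)) (g : PySem.Dict (Int × Int) (PySem.Set (Int × Int)))
    (fuel : Nat) : Prop :=
  ∀ l vis, (∀ a ∈ l, a ∈ g.keys) → vis.keys = g.keys → pvUc g.keys vis ≤ fuel →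
    ∃ w, pvDfsList g fuel l vis = some w ∧
      w.keys = vis.keys ∧
      (∀ k, vis.getD k false = true → w.getD k false = true) ∧
      (∀ a ∈ l, w.getD a false = true) ∧
      (∀ k, w.getD k false = true → vis.getD k false = true ∨ ∃ a ∈ l, pvReach grid a k) ∧
      (∀ k, w.getD k false = true →
        vis.getD k false = true ∨ ∀ u, pvAdjB grid k u = true → w.getD u false = true)

lemma pvP_zero (grid : List (List Int)) (g : PySem.Dict (Int × Int) (PySem.Set (Int × Int))) :
    pvPprop grid g 0 := by
  intro node vis hmem hkeys hfalse huc
  have := pvUc_pos hmem hfalse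
  omega

lemma pvQ_of_P (grid : List (List Int)) (g : PySem.Dict (Int × Int) (PySem.Set (Int × Int)))
    (fuel : Nat) (hP : pvPprop grid g fuel) : pvQprop grid g fuel := by
  intro l
  induction l with
  | nil =>
    intro vis _ _ _
    exact ⟨vis, by simp [pvDfsList], rfl, fun _ h => h, by simp, fun k h => Or.inl h,
      fun k h => Or.inl h⟩
  | cons a rest ih =>
    intro vis hmem hkeys huc
    by_cases hva : vis.getD a false = false
    · obtain ⟨w1, hw1, hk1, hm1, hmark1, hs1, hc1⟩ :=
        hP a vis (hmem a (by simp)) hkeys hva huc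
      obtain ⟨w, hw, hk2, hm2, hmark2, hs2, hc2⟩ :=
        ih w1 (fun x hx => hmem x (by simp [hx])) (hk1.trans hkeys)
          (le_trans (pvUc_mono hm1) huc)
      refine ⟨w, ?_, hk2.trans hk1, fun k hk => hm2 k (hm1 k hk), ?_, ?_, ?_⟩
      · simp only [pvDfsList, hva, if_true, hw1]
        exact hw
      · intro x hx
        rcases List.mem_cons.1 hx with rfl | hx'
        · exact hm2 _ hmark1
        · exact hmark2 x hx'
      · intro k hk
        rcases hs2 k hk with h1 | ⟨b, hb, hr⟩
        · rcases hs1 k h1 with h2 | hr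
          · exact Or.inl h2
          · exact Or.inr ⟨a, by simp, hr⟩
        · exact Or.inr ⟨b, by simp [hb], hr⟩
      · intro k hk
        rcases hc2 k hk with h1 | hcl
        · rcases hc1 k h1 with h2 | hcl1
          · exact Or.inl h2
          · exact Or.inr (fun u hu => hm2 u (hcl1 u hu))
        · exact Or.inr hcl
    · have hva' : vis.getD a false = true := by
        cases h : vis.getD a false with
        | false => exact absurd h hva
        | true => rfl
      obtain ⟨w, hw, hk2, hm2, hmark2, hs2, hc2⟩ :=
        ih vis (fun x hx => hmem x (by simp [hx])) hkeys huc
      refine ⟨w, ?_, hk2, hm2, ?_, ?_, ?_⟩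
      · simp only [pvDfsList, hva', if_neg]
        simpa using hw
      · intro x hx
        rcases List.mem_cons.1 hx with rfl | hx'
        · exact hm2 _ hva'
        · exact hmark2 x hx'
      · intro k hk
        rcases hs2 k hk with h1 | ⟨b, hb, hr⟩
        · exact Or.inl h1
        · exact Or.inr ⟨b, by simp [hb], hr⟩
      · exact hc2

lemma pvP_succ (grid : List (List Int)) (g : PySem.Dict (Int × Int) (PySem.Set (Int × Int)))
    (HG : ∀ p u, u ∈ g.getD p PySem.Set.empty ↔ pvAdjB grid p u = true)
    (HK : ∀ p, p ∈ g.keys ↔ pvOneB grid p = true) (hnd : g.keys.Nodup)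
    (fuel : Nat) (hQ : pvQprop grid g fuel) : pvPprop grid g (fuel + 1) := by
  intro node vis hmem hkeys hfalse huc
  have hcont : vis.contains node = true :=
    (PySem.Dict.contains_iff_mem_keys vis node).2 (hkeys ▸ hmem)
  have hk1 : (vis.insert node true).keys = vis.keys :=
    PySem.Dict.keys_insert_of_contains vis true hcont
  have hv1 : ∀ k, (vis.insert node true).getD k false = true ↔
      (k = node ∨ vis.getD k false = true) := by
    intro k
    rw [PySem.Dict.getD_insert]
    by_cases hkn : k = node
    · simp [hkn]
    · simp [hkn]
  have huc1 : pvUc g.keys (vis.insert node true) ≤ fuel := by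
    have := pvUc_insert hnd hmem hfalse
    omega
  have hmeml : ∀ a ∈ g.getD node PySem.Set.empty, a ∈ g.keys := by
    intro a ha
    exact (HK a).2 (pvAdjB_one ((HG node a).1 ha)).2
  obtain ⟨w, hw, hkw, hmw, hmarkw, hsw, hcw⟩ :=
    hQ (g.getD node PySem.Set.empty) (vis.insert node true) hmeml (hk1.trans hkeys) huc1
  refine ⟨w, ?_, hkw.trans hk1, ?_, ?_, ?_, ?_⟩
  · simp only [pvDfs]
    exact hw
  · intro k hk
    exact hmw k ((hv1 k).2 (Or.inr hk))
  · exact hmw node ((hv1 node).2 (Or.inl rfl))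
  · intro k hk
    rcases hsw k hk with h1 | ⟨a, ha, hr⟩
    · rcases (hv1 k).1 h1 with rfl | h2
      · exact Or.inr Relation.ReflTransGen.refl
      · exact Or.inl h2
    · exact Or.inr (Relation.ReflTransGen.head ((HG node a).1 ha) hr)
  · intro k hk
    rcases hcw k hk with h1 | hcl
    · rcases (hv1 k).1 h1 with rfl | h2
      · refine Or.inr (fun u hu => hmarkw u ((HG k u).2 hu))
      · exact Or.inl h2
    · exact Or.inr hcl

lemma pvDfs_spec (grid : List (List Int)) (g : PySem.Dict (Int × Int) (PySem.Set (Int × Int)))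
    (HG : ∀ p u, u ∈ g.getD p PySem.Set.empty ↔ pvAdjB grid p u = true)
    (HK : ∀ p, p ∈ g.keys ↔ pvOneB grid p = true) (hnd : g.keys.Nodup) :
    ∀ fuel, pvPprop grid g fuel := by
  intro fuel
  induction fuel with
  | zero => exact pvP_zero grid g
  | succ n ih => exact pvP_succ grid g HG HK hnd n (pvQ_of_P grid g n ih)

lemma pvAllVisited_iff {K} {vis : PySem.Dict (Int × Int) Bool} (hk : vis.keys = K) (hnd : K.Nodup) :
    pvAllVisited vis = true ↔ ∀ k ∈ K, vis.getD k false = true := by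
  rw [pvAllVisited, PySem.Dict.values_eq_map_keys vis (by rw [hk]; exact hnd) false, hk,
    List.all_map]
  simp [List.all_eq_true]

lemma pvVis0_getD_aux (K : List (Int × Int)) :
    ∀ (d : PySem.Dict (Int × Int) Bool), (∀ k, d.getD k false = false) →
      ∀ k, (K.foldl (fun d n => d.insert n false) d).getD k false = false := by
  induction K with
  | nil => intro d h k; exact h k
  | cons n K ih =>
    intro d h k
    refine ih (d.insert n false) ?_ k
    intro k'
    rw [PySem.Dict.getD_insert]
    by_cases hkn : k' = n
    · simp [hkn]
    · simp [hkn, h k']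

lemma pvVis0_getD (K : List (Int × Int)) (k : Int × Int) :
    (K.foldl (fun d n => d.insert n false) PySem.Dict.empty).getD k false = false := by
  exact pvVis0_getD_aux K PySem.Dict.empty (fun k' => PySem.Dict.getD_empty k' false) k

lemma pvVis0_keys (K : List (Int × Int)) (hnd : K.Nodup) :
    (K.foldl (fun d n => d.insert n false) PySem.Dict.empty).keys = K := by
  rw [PySem.Dict.keys_foldl_insert]
  rw [PySem.Dict.keys_empty, PySem.Set.update_nil_left]
  exact PySem.Set.ofList_eq_self_of_nodup K hnd

-- the count_sections loop counts the components of the not-yet-visited starts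
lemma pvCountLoop_spec (grid : List (List Int)) (g : PySem.Dict (Int × Int) (PySem.Set (Int × Int)))
    (HG : ∀ p u, u ∈ g.getD p PySem.Set.empty ↔ pvAdjB grid p u = true)
    (HK : ∀ p, p ∈ g.keys ↔ pvOneB grid p = true) (hnd : g.keys.Nodup) (fuel : Nat)
    (hfuel : g.keys.length < fuel) :
    ∀ L vis c (T : Finset (Finset (Int × Int))), (∀ p ∈ L, p ∈ g.keys) → vis.keys = g.keys →
      (∀ C ∈ T, ∃ u, pvOneB grid u = true ∧ C = pvComp grid u) →
      (∀ k, vis.getD k false = true ↔ ∃ C ∈ T, k ∈ C) →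
      pvCountLoop g fuel L vis c = some (c + (((pvImg grid L) \ T).card : Int)) := by
  intro L
  induction L with
  | nil =>
    intro vis c T _ _ _ _
    simp [pvCountLoop, pvImg]
  | cons node rest ih =>
    intro vis c T hL hkeys hT hM
    have hnodeK : node ∈ g.keys := hL node (by simp)
    have hone : pvOneB grid node = true := (HK node).1 hnodeK
    have habsorb : ∀ r, vis.getD r false = true → pvComp grid r ∈ T := by
      intro r hv
      obtain ⟨C, hC, hkC⟩ := (hM r).1 hv
      obtain ⟨u, hu, rfl⟩ := hT C hC
      rw [pvComp_eq_of_mem hkC]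
      exact hC
    have hvisclosed : ∀ k, vis.getD k false = true →
        ∀ u, pvAdjB grid k u = true → vis.getD u false = true := by
      intro k hk u hu
      obtain ⟨C, hC, hkC⟩ := (hM k).1 hk
      obtain ⟨v0, h1, rfl⟩ := hT C hC
      exact (hM u).2 ⟨_, hC, pvComp_closed hkC hu⟩
    by_cases hv : vis.getD node false = false
    · -- node not yet visited: a DFS happens
      obtain ⟨w, hw, hkw, hmono, hmark, hsound, hclosure⟩ :=
        pvDfs_spec grid g HG HK hnd fuel node vis hnodeK hkeys hv
          (le_trans (List.length_filter_le _ _) (le_of_lt hfuel))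
      have hW : ∀ k, w.getD k false = true ↔ ((∃ C ∈ T, k ∈ C) ∨ k ∈ pvComp grid node) := by
        intro k
        constructor
        · intro hk
          rcases hsound k hk with h1 | hr
          · exact Or.inl ((hM k).1 h1)
          · exact Or.inr (mem_pvComp.2 ⟨pvReach_one hr hone, hr⟩)
        · rintro (hT' | hcompk)
          · exact hmono k ((hM k).2 hT')
          · have hreach : ∀ k, pvReach grid node k → w.getD k false = true := by
              intro k hr
              induction hr with
              | refl => exact hmark
              | tail hab hadj ih2 =>
                rcases hclosure _ ih2 with hvb | hcl
                · exact hmono _ (hvisclosed _ hvb _ hadj)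
                · exact hcl _ hadj
            exact hreach k (mem_pvComp.1 hcompk).2
      have hnotinT : pvComp grid node ∉ T := by
        intro hin
        have ht : vis.getD node false = true := (hM node).2 ⟨_, hin, self_mem_pvComp hone⟩
        rw [ht] at hv
        cases hv
      have hT' : ∀ C ∈ insert (pvComp grid node) T, ∃ u, pvOneB grid u = true ∧ C = pvComp grid u := by
        intro C hC
        rcases Finset.mem_insert.1 hC with rfl | h
        · exact ⟨node, hone, rfl⟩
        · exact hT C h
      have hM' : ∀ k, w.getD k false = true ↔ ∃ C ∈ insert (pvComp grid node) T, k ∈ C := by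
        intro k
        rw [hW k]
        constructor
        · rintro (⟨C, hC, hk⟩ | hk)
          · exact ⟨C, Finset.mem_insert_of_mem hC, hk⟩
          · exact ⟨_, Finset.mem_insert_self _ _, hk⟩
        · rintro ⟨C, hC, hk⟩
          rcases Finset.mem_insert.1 hC with rfl | h
          · exact Or.inr hk
          · exact Or.inl ⟨C, h, hk⟩
      have hcard : (c + (((pvImg grid (node :: rest)) \ T).card : Int)) =
          c + 1 + (((pvImg grid rest \ insert (pvComp grid node) T).card : Int)) := by
        rw [pvImg_cons_one hone, pv_card_step_new hnotinT]
        ring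
      by_cases hall : pvAllVisited w = true
      · -- the early break: everything is visited now
        have hz : (pvImg grid rest \ insert (pvComp grid node) T).card = 0 := by
          rw [Finset.card_eq_zero, Finset.sdiff_eq_empty_iff_subset]
          intro C hC
          obtain ⟨r, hr, rfl⟩ := Finset.mem_image.1 hC
          rw [List.mem_toFinset, List.mem_filter] at hr
          have hrone : pvOneB grid r = true := by simpa using hr.2
          have hrvis : w.getD r false = true :=
            (pvAllVisited_iff (hkw.trans hkeys) hnd).1 hall r ((HK r).2 hrone)
          rcases (hW r).1 hrvis with ⟨C, hC', hrc⟩ | hrc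
          · obtain ⟨u, hu, rfl⟩ := hT C hC'
            rw [pvComp_eq_of_mem hrc]
            exact Finset.mem_insert_of_mem hC'
          · rw [pvComp_eq_of_mem hrc]
            exact Finset.mem_insert_self _ _
        simp only [pvCountLoop, hv, if_true, hw, hall]
        rw [hcard, hz]
        norm_num
      · simp only [pvCountLoop, hv, if_true, hw, hall]
        rw [ih w (c + 1) (insert (pvComp grid node) T)
          (fun p hp => hL p (by simp [hp])) (hkw.trans hkeys) hT' hM', hcard]
        simp
    · -- node already visited
      have hvt : vis.getD node false = true := by
        cases h : vis.getD node false with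
        | false => exact absurd h hv
        | true => rfl
      have hcompT : pvComp grid node ∈ T := habsorb node hvt
      have hcard : pvImg grid (node :: rest) \ T = pvImg grid rest \ T := by
        rw [pvImg_cons_one hone, Finset.insert_sdiff_of_mem _ hcompT]
      by_cases hall : pvAllVisited vis = true
      · have hz : (pvImg grid rest \ T).card = 0 := by
          rw [Finset.card_eq_zero, Finset.sdiff_eq_empty_iff_subset]
          intro C hC
          obtain ⟨r, hr, rfl⟩ := Finset.mem_image.1 hC
          rw [List.mem_toFinset, List.mem_filter] at hr
          have hrone : pvOneB grid r = true := by simpa using hr.2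
          exact habsorb r ((pvAllVisited_iff hkeys hnd).1 hall r ((HK r).2 hrone))
        simp only [pvCountLoop, hv, if_false, hall, if_true]
        rw [hcard, hz]
        norm_num
      · simp only [pvCountLoop, hv, if_false, hall]
        rw [ih vis c T (fun p hp => hL p (by simp [hp])) hkeys hT hM, hcard]
        simp

lemma island_counter_eq (grid : List (List Int)) (hpre : Pre_island_counter grid) :
    island_counter grid = (((pvImg grid (pvAll2 grid)) \ ∅).card : Int) := by
  obtain ⟨HK, HG, hnd⟩ := pvBuild_char grid
  have himg : pvImg grid (pvBuild grid).keys = pvImg grid (pvAll2 grid) := by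
    unfold pvImg
    congr 1
    ext x
    simp only [List.mem_toFinset, List.mem_filter]
    constructor
    · rintro ⟨hx, hone⟩
      exact ⟨mem_pvAll2_of_one (by simpa using hone), hone⟩
    · rintro ⟨hx, hone⟩
      exact ⟨(HK x).2 (by simpa using hone), hone⟩
  have hspec := pvCountLoop_spec grid (pvBuild grid) HG HK hnd
    ((pvBuild grid).keys.length + 1) (by omega) (pvBuild grid).keys
    ((pvBuild grid).keys.foldl (fun d n => d.insert n false) PySem.Dict.empty) 0 ∅
    (fun p hp => hp) (pvVis0_keys _ hnd) (by simp)
    (by intro k; rw [pvVis0_getD]; simp)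
  unfold island_counter
  dsimp only
  rw [hspec, himg]
  norm_num

-- ---- B side: flood fill ----

lemma pvFloodStep_char (grid : List (List Int)) (ns : List (Int × Int)) :
    ∀ (vis : PySem.Set (Int × Int)) (rest : List (Int × Int)), vis.Nodup →
    ∃ pushed, (ns.foldl (fun (acc : PySem.Set (Int × Int) × List (Int × Int)) q =>
        if 0 ≤ q.1 && q.1 < pvRowsI grid && 0 ≤ q.2 && q.2 < pvColsI grid
            && pvGet grid q.1 q.2 == 1 && !(PySem.Set.contains acc.1 q) then
          (PySem.Set.add acc.1 q, acc.2 ++ [q])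
        else acc) (vis, rest)) = (vis ++ pushed, rest ++ pushed) ∧
      (vis ++ pushed).Nodup ∧
      (∀ k, k ∈ pushed ↔ k ∈ ns ∧ pvOneB grid k = true ∧ k ∉ vis) := by
  induction ns with
  | nil =>
    intro vis rest hnd
    exact ⟨[], by simp, by simpa using hnd, by simp⟩
  | cons q ns ih =>
    intro vis rest hnd
    rw [List.foldl_cons]
    have hcond : (0 ≤ q.1 && q.1 < pvRowsI grid && (0 ≤ q.2) && q.2 < pvColsI grid
        && (pvGet grid q.1 q.2 == 1) && !(PySem.Set.contains vis q))
        = (pvOneB grid q && !(PySem.Set.contains vis q)) := rfl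
    by_cases hg : (pvOneB grid q && !(PySem.Set.contains vis q)) = true
    · have hq : pvOneB grid q = true ∧ q ∉ vis := by
        simp only [Bool.and_eq_true, Bool.not_eq_true'] at hg
        refine ⟨hg.1, ?_⟩
        have := hg.2
        simp only [PySem.Set.contains_eq_listContains] at this
        simpa using this
      rw [show (if (0 ≤ q.1 && q.1 < pvRowsI grid && (0 ≤ q.2) && q.2 < pvColsI grid
          && (pvGet grid q.1 q.2 == 1) && !(PySem.Set.contains (vis, rest).1 q)) = true then
          ((PySem.Set.add (vis, rest).1 q : PySem.Set (Int × Int)), (vis, rest).2 ++ [q])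
        else (vis, rest)) = ((PySem.Set.add vis q : PySem.Set (Int × Int)), rest ++ [q]) from by
          rw [if_pos (by exact hg)]]
      rw [PySem.Set.add_of_not_mem hq.2]
      obtain ⟨pushed, heq, hnd', hmem⟩ := ih (vis ++ [q]) (rest ++ [q])
        (List.Nodup.append hnd (List.nodup_singleton q)
          (by intro a ha hb; rw [List.mem_singleton] at hb; subst hb; exact hq.2 ha))
      refine ⟨q :: pushed, ?_, ?_, ?_⟩
      · rw [heq]
        simp
      · rw [List.append_assoc] at hnd'
        simpa using hnd'
      · intro k
        rw [List.mem_cons, hmem k]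
        constructor
        · rintro (rfl | ⟨hk1, hk2, hk3⟩)
          · exact ⟨by simp, hq.1, hq.2⟩
          · exact ⟨by simp [hk1], hk2, fun hc => hk3 (by simp [hc])⟩
        · rintro ⟨hk1, hk2, hk3⟩
          rcases List.mem_cons.1 hk1 with rfl | hk1'
          · exact Or.inl rfl
          · by_cases hkq : k = q
            · exact Or.inl hkq
            · exact Or.inr ⟨hk1', hk2, by simp [hk3, hkq]⟩
    · rw [show (if (0 ≤ q.1 && q.1 < pvRowsI grid && (0 ≤ q.2) && q.2 < pvColsI grid
          && (pvGet grid q.1 q.2 == 1) && !(PySem.Set.contains (vis, rest).1 q)) = true then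
          ((PySem.Set.add (vis, rest).1 q : PySem.Set (Int × Int)), (vis, rest).2 ++ [q])
        else (vis, rest)) = (vis, rest) from by rw [if_neg (by exact hg)]]
      obtain ⟨pushed, heq, hnd', hmem⟩ := ih vis rest hnd
      refine ⟨pushed, heq, hnd', ?_⟩
      intro k
      rw [hmem k]
      have hng : ¬ (pvOneB grid k = true ∧ k ∉ vis) ∨ k ≠ q := by
        by_cases hkq : k = q
        · subst hkq
          left
          intro ⟨h1, h2⟩
          apply hg
          simp only [Bool.and_eq_true, Bool.not_eq_true', h1, true_and]
          simp only [PySem.Set.contains_eq_listContains]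
          simpa using h2
        · exact Or.inr hkq
      constructor
      · rintro ⟨hk1, hk2, hk3⟩
        exact ⟨by simp [hk1], hk2, hk3⟩
      · rintro ⟨hk1, hk2, hk3⟩
        rcases List.mem_cons.1 hk1 with rfl | hk1'
        · rcases hng with h | h
          · exact absurd ⟨hk2, hk3⟩ h
          · exact absurd rfl h
        · exact ⟨hk1', hk2, hk3⟩

lemma pvNeighbors_iff {grid : List (List Int)} {x u : Int × Int} (hx : pvOneB grid x = true) :
    pvAdjB grid x u = true ↔
      (u ∈ [(x.1 - 1, x.2), (x.1 + 1, x.2), (x.1, x.2 - 1), (x.1, x.2 + 1)] ∧ pvOneB grid u = true) := by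
  obtain ⟨i, j⟩ := x
  constructor
  · intro h
    exact ⟨by simpa using pvAdj_classify h, (pvAdjB_one h).2⟩
  · rintro ⟨hmem, hone⟩
    simp only [pvAdjB, Bool.and_eq_true, beq_iff_eq]
    refine ⟨⟨hx, hone⟩, ?_⟩
    obtain ⟨a, b⟩ := u
    simp only [List.mem_cons, List.mem_singleton, Prod.mk.injEq, List.not_mem_nil, or_false] at hmem
    omega

lemma pvFlood_spec (grid : List (List Int)) :
    ∀ fuel (stack : List (Int × Int)) (vis : PySem.Set (Int × Int)),
      (∀ p ∈ vis, pvOneB grid p = true) → vis.Nodup → (∀ s ∈ stack, s ∈ vis) →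
      (∀ v ∈ vis, v ∈ stack ∨ ∀ u, pvAdjB grid v u = true → u ∈ vis) →
      stack.length + (pvAll2 grid).length < fuel + vis.length →
      ∃ w, pvFlood grid (pvRowsI grid) (pvColsI grid) fuel stack vis = some w ∧
        (∀ p ∈ vis, p ∈ w) ∧ w.Nodup ∧ (∀ p ∈ w, pvOneB grid p = true) ∧
        (∀ k ∈ w, k ∈ vis ∨ ∃ s ∈ stack, pvReach grid s k) ∧
        (∀ v ∈ w, ∀ u, pvAdjB grid v u = true → u ∈ w) := by
  intro fuel
  induction fuel with
  | zero =>
    intro stack vis hone hnd hsv Hc hfuel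
    cases stack with
    | nil =>
      refine ⟨vis, by simp [pvFlood], fun p hp => hp, hnd, hone, fun k hk => Or.inl hk, ?_⟩
      intro v hv u hu
      rcases Hc v hv with h | h
      · cases h
      · exact h u hu
    | cons s ss =>
      exfalso
      have hlen : vis.length ≤ (pvAll2 grid).length :=
        (List.subperm_of_subset hnd (fun p hp => mem_pvAll2_of_one (hone p hp))).length_le
      simp only [List.length_cons] at hfuel
      omega
  | succ fuel ih =>
    intro stack vis hone hnd hsv Hc hfuel
    cases stack with
    | nil =>
      refine ⟨vis, by simp [pvFlood], fun p hp => hp, hnd, hone, fun k hk => Or.inl hk, ?_⟩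
      intro v hv u hu
      rcases Hc v hv with h | h
      · cases h
      · exact h u hu
    | cons s ss =>
      have hne : (s :: ss : List (Int × Int)) ≠ [] := by simp
      have hsplit : (s :: ss).dropLast ++ [(s :: ss).getLast hne] = s :: ss :=
        List.dropLast_append_getLast hne
      set x := (s :: ss).getLast hne with hxdef
      set rest := (s :: ss).dropLast with hrdef
      have hxmem : x ∈ s :: ss := List.getLast_mem hne
      have hrsub : rest ⊆ s :: ss := List.dropLast_subset _
      have hpop : PySem.List.pop? (s :: ss) (-1) = some (x, rest) := by
        have h := PySem.List.pop?_last rest x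
        rw [hsplit] at h
        exact h
      have hxone : pvOneB grid x = true := hone x (hsv x hxmem)
      obtain ⟨pushed, hfold, hnd', hpmem⟩ := pvFloodStep_char grid
        [(x.1 - 1, x.2), (x.1 + 1, x.2), (x.1, x.2 - 1), (x.1, x.2 + 1)] vis rest hnd
      have hone' : ∀ p ∈ vis ++ pushed, pvOneB grid p = true := by
        intro p hp
        rcases List.mem_append.1 hp with hp | hp
        · exact hone p hp
        · exact ((hpmem p).1 hp).2.1
      have hsv' : ∀ p ∈ rest ++ pushed, p ∈ vis ++ pushed := by
        intro p hp
        rcases List.mem_append.1 hp with hp | hp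
        · exact List.mem_append.2 (Or.inl (hsv p (hrsub hp)))
        · exact List.mem_append.2 (Or.inr hp)
      have Hc' : ∀ v ∈ vis ++ pushed, v ∈ rest ++ pushed ∨
          ∀ u, pvAdjB grid v u = true → u ∈ vis ++ pushed := by
        intro v hv
        rcases List.mem_append.1 hv with hv | hv
        · rcases Hc v hv with hst | hcl
          · rw [← hsplit] at hst
            rcases List.mem_append.1 hst with hst | hst
            · exact Or.inl (List.mem_append.2 (Or.inl hst))
            · rw [List.mem_singleton] at hst
              subst hst
              refine Or.inr (fun u hu => ?_)
              obtain ⟨hmem4, huone⟩ := (pvNeighbors_iff hxone).1 hu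
              by_cases huv : u ∈ vis
              · exact List.mem_append.2 (Or.inl huv)
              · exact List.mem_append.2 (Or.inr ((hpmem u).2 ⟨hmem4, huone, huv⟩))
          · exact Or.inr (fun u hu => List.mem_append.2 (Or.inl (hcl u hu)))
        · exact Or.inl (List.mem_append.2 (Or.inr hv))
      have hfuel' : (rest ++ pushed).length + (pvAll2 grid).length
          < fuel + (vis ++ pushed).length := by
        have hr : rest.length = ss.length := by
          rw [hrdef, List.length_dropLast, List.length_cons]
          omega
        simp only [List.length_append, hr] at *
        simp only [List.length_cons] at hfuel
        omega
      obtain ⟨w, hw, hsub, hwnd, hwone, hwsound, hwclosed⟩ :=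
        ih (rest ++ pushed) (vis ++ pushed) hone' hnd' hsv' Hc' hfuel'
      refine ⟨w, ?_, ?_, hwnd, hwone, ?_, hwclosed⟩
      · simp only [pvFlood, hpop]
        rw [hfold]
        exact hw
      · intro p hp
        exact hsub p (List.mem_append.2 (Or.inl hp))
      · intro k hk
        rcases hwsound k hk with hk1 | ⟨s', hs', hr⟩
        · rcases List.mem_append.1 hk1 with hk1 | hk1
          · exact Or.inl hk1
          · obtain ⟨hmem4, hkone, -⟩ := (hpmem k).1 hk1
            exact Or.inr ⟨x, hxmem,
              Relation.ReflTransGen.single ((pvNeighbors_iff hxone).2 ⟨hmem4, hkone⟩)⟩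
        · rcases List.mem_append.1 hs' with hs' | hs'
          · exact Or.inr ⟨s', hrsub hs', hr⟩
          · obtain ⟨hmem4, hsone, -⟩ := (hpmem s').1 hs'
            exact Or.inr ⟨x, hxmem,
              Relation.ReflTransGen.head ((pvNeighbors_iff hxone).2 ⟨hmem4, hsone⟩) hr⟩

lemma pvBLoop_spec (grid : List (List Int)) (fuel : Nat)
    (hfuel : (pvAll2 grid).length < fuel) :
    ∀ L (vis : PySem.Set (Int × Int)) (c : Int) (T : Finset (Finset (Int × Int))),
      (∀ p ∈ L, p ∈ pvAll2 grid) → (∀ p ∈ vis, pvOneB grid p = true) → vis.Nodup →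
      (∀ C ∈ T, ∃ u, pvOneB grid u = true ∧ C = pvComp grid u) →
      (∀ k, k ∈ vis ↔ ∃ C ∈ T, k ∈ C) →
      ∃ vis', L.foldl (fun acc p =>
          pvBStep grid (pvRowsI grid) (pvColsI grid) fuel acc p.1 p.2) (some (vis, c))
        = some (vis', c + (((pvImg grid L) \ T).card : Int)) := by
  intro L
  induction L with
  | nil =>
    intro vis c T _ _ _ _ _
    exact ⟨vis, by simp [pvImg]⟩
  | cons p rest ih =>
    intro vis c T hL hone hnd hT hM
    obtain ⟨pi, pj⟩ := p
    have hb := mem_pvAll2.1 (hL (pi, pj) (by simp))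
    have habsorb : ∀ r, r ∈ vis → pvComp grid r ∈ T := by
      intro r hv
      obtain ⟨C, hC, hkC⟩ := (hM r).1 hv
      obtain ⟨u, hu, rfl⟩ := hT C hC
      rw [pvComp_eq_of_mem hkC]
      exact hC
    have hvisclosed : ∀ k, k ∈ vis → ∀ u, pvAdjB grid k u = true → u ∈ vis := by
      intro k hk u hu
      obtain ⟨C, hC, hkC⟩ := (hM k).1 hk
      obtain ⟨v0, h1, rfl⟩ := hT C hC
      exact (hM u).2 ⟨_, hC, pvComp_closed hkC hu⟩
    rw [List.foldl_cons]
    by_cases honep : pvOneB grid (pi, pj) = true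
    · have hget : (pvGet grid pi pj == 1) = true := by
        simp only [pvOneB, Bool.and_eq_true] at honep
        exact honep.2
      by_cases hpv : (pi, pj) ∈ vis
      · -- already visited: skip, and its component is already counted
        have hg : (pvGet grid pi pj == 1 && !(PySem.Set.contains vis (pi, pj))) = false := by
          simp only [PySem.Set.contains_eq_listContains]
          simp [hpv]
        have hstep : pvBStep grid (pvRowsI grid) (pvColsI grid) fuel (some (vis, c)) pi pj
            = some (vis, c) := by
          unfold pvBStep
          dsimp only
          rw [if_neg (by rw [hg]; simp)]
        rw [hstep]
        obtain ⟨vis', heq⟩ := ih vis c T (fun q hq => hL q (by simp [hq])) hone hnd hT hM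
        refine ⟨vis', ?_⟩
        rw [heq, pvImg_cons_one honep, Finset.insert_sdiff_of_mem _ (habsorb _ hpv)]
      · -- new component found
        have hg : (pvGet grid pi pj == 1 && !(PySem.Set.contains vis (pi, pj))) = true := by
          simp only [PySem.Set.contains_eq_listContains, hget, Bool.true_and, Bool.not_eq_true']
          simpa using hpv
        have hvis1 : PySem.Set.add vis (pi, pj) = vis ++ [(pi, pj)] :=
          PySem.Set.add_of_not_mem hpv
        obtain ⟨w, hw, hsub, hwnd, hwone, hwsound, hwclosed⟩ :=
          pvFlood_spec grid fuel [(pi, pj)] (vis ++ [(pi, pj)])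
            (by intro q hq
                rcases List.mem_append.1 hq with hq | hq
                · exact hone q hq
                · rw [List.mem_singleton] at hq; subst hq; exact honep)
            (List.Nodup.append hnd (List.nodup_singleton _)
              (by intro a ha hb'; rw [List.mem_singleton] at hb'; subst hb'; exact hpv ha))
            (by intro q hq; rw [List.mem_singleton] at hq; subst hq; simp)
            (by intro v hv
                rcases List.mem_append.1 hv with hv | hv
                · exact Or.inr (fun u hu => List.mem_append.2 (Or.inl (hvisclosed v hv u hu)))
                · exact Or.inl hv)
            (by simp only [List.length_append, List.length_singleton, List.length_cons]
                omega)
        have hWchar : ∀ k, k ∈ w ↔ ((∃ C ∈ T, k ∈ C) ∨ k ∈ pvComp grid (pi, pj)) := by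
          intro k
          constructor
          · intro hk
            rcases hwsound k hk with hk1 | ⟨s', hs', hr⟩
            · rcases List.mem_append.1 hk1 with hk1 | hk1
              · exact Or.inl ((hM k).1 hk1)
              · rw [List.mem_singleton] at hk1
                subst hk1
                exact Or.inr (self_mem_pvComp honep)
            · rw [List.mem_singleton] at hs'
              subst hs'
              exact Or.inr (mem_pvComp.2 ⟨pvReach_one hr honep, hr⟩)
          · rintro (⟨C, hC, hk⟩ | hk)
            · exact hsub k (List.mem_append.2 (Or.inl ((hM k).2 ⟨C, hC, hk⟩)))
            · have hreach : ∀ k, pvReach grid (pi, pj) k → k ∈ w := by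
                intro k hr
                induction hr with
                | refl => exact hsub _ (List.mem_append.2 (Or.inr (by simp)))
                | tail hab hadj ih2 => exact hwclosed _ ih2 _ hadj
              exact hreach k (mem_pvComp.1 hk).2
        have hnotinT : pvComp grid (pi, pj) ∉ T := by
          intro hin
          exact hpv ((hM (pi, pj)).2 ⟨_, hin, self_mem_pvComp honep⟩)
        have hT' : ∀ C ∈ insert (pvComp grid (pi, pj)) T,
            ∃ u, pvOneB grid u = true ∧ C = pvComp grid u := by
          intro C hC
          rcases Finset.mem_insert.1 hC with rfl | h
          · exact ⟨(pi, pj), honep, rfl⟩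
          · exact hT C h
        have hM' : ∀ k, k ∈ w ↔ ∃ C ∈ insert (pvComp grid (pi, pj)) T, k ∈ C := by
          intro k
          rw [hWchar k]
          constructor
          · rintro (⟨C, hC, hk⟩ | hk)
            · exact ⟨C, Finset.mem_insert_of_mem hC, hk⟩
            · exact ⟨_, Finset.mem_insert_self _ _, hk⟩
          · rintro ⟨C, hC, hk⟩
            rcases Finset.mem_insert.1 hC with rfl | h
            · exact Or.inr hk
            · exact Or.inl ⟨C, h, hk⟩
        have hstep : pvBStep grid (pvRowsI grid) (pvColsI grid) fuel (some (vis, c)) pi pj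
            = some (w, c + 1) := by
          unfold pvBStep
          dsimp only
          rw [if_pos hg]
          rw [hvis1, hw]
        rw [hstep]
        obtain ⟨vis', heq⟩ := ih w (c + 1) (insert (pvComp grid (pi, pj)) T)
          (fun q hq => hL q (by simp [hq])) hwone hwnd hT' hM'
        refine ⟨vis', ?_⟩
        rw [heq, pvImg_cons_one honep, pv_card_step_new hnotinT]
        ring_nf
    · -- not a 1-cell: the guard fails
      have hget : (pvGet grid pi pj == 1) = false := by
        cases h : (pvGet grid pi pj == 1) with
        | false => rfl
        | true =>
          exfalso
          apply honep
          simp only [pvOneB, Bool.and_eq_true, decide_eq_true_eq]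
          exact ⟨⟨⟨⟨hb.1, hb.2.1⟩, hb.2.2.1⟩, hb.2.2.2⟩, h⟩
      have hg : (pvGet grid pi pj == 1 && !(PySem.Set.contains vis (pi, pj))) = false := by
        rw [hget]
        simp
      have hstep : pvBStep grid (pvRowsI grid) (pvColsI grid) fuel (some (vis, c)) pi pj
          = some (vis, c) := by
        unfold pvBStep
        dsimp only
        rw [if_neg (by rw [hg]; simp)]
      rw [hstep]
      obtain ⟨vis', heq⟩ := ih vis c T (fun q hq => hL q (by simp [hq])) hone hnd hT hM
      refine ⟨vis', ?_⟩
      rw [heq, pvImg_cons_zero honep]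

lemma island_counter_alt_eq (grid : List (List Int)) (hpre : Pre_island_counter grid) :
    island_counter_alt grid = (((pvImg grid (pvAll2 grid)) \ ∅).card : Int) := by
  have hr : PySem.List.len grid = pvRowsI grid := by simp [pvRowsI]
  have hc : PySem.List.len (PySem.List.pyGetD grid 0 ([] : List Int)) = pvColsI grid := by
    rw [pvGetD_zero_headD]
    simp [pvColsI]
  have hf : grid.length * (PySem.List.pyGetD grid 0 ([] : List Int)).length + 1
      = (pvAll2 grid).length + 1 := by
    rw [pvGetD_zero_headD, length_pvAll2]
  unfold island_counter_alt
  dsimp only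
  rw [hr, hc, hf]
  rw [pv_foldl_nested _ _
    (fun acc p => pvBStep grid (pvRowsI grid) (pvColsI grid) ((pvAll2 grid).length + 1) acc p.1 p.2)]
  have hflat : ((PySem.List.pyRange 0 (pvRowsI grid) 1).flatMap
      (fun i => (PySem.List.pyRange 0 (pvColsI grid) 1).map (Prod.mk i))) = pvAll2 grid := rfl
  rw [hflat]
  obtain ⟨vis', heq⟩ := pvBLoop_spec grid ((pvAll2 grid).length + 1) (by omega)
    (pvAll2 grid) PySem.Set.empty 0 ∅ (fun q hq => hq) (by intro q hq; cases hq)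
    List.nodup_nil (by intro C hC; cases hC) (by intro k; simp [PySem.Set.empty])
  rw [heq]
  norm_num

-- ===== VERDICT (by name: the statement is the Claim_ definition above) =====
theorem island_counter_spec : Claim_equal_island_counter := by
  intro grid _ hpre
  unfold Spec_island_counter
  rw [island_counter_eq grid hpre, island_counter_alt_eq grid hpre]
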